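-- pv_equiv track=rewrite | github.com/pedronery07/Pygame-2023.1 | funcoes.py | cria_grid
-- ===== SOURCE A (Python) =====
-- def cria_grid(posicao_fixa = {}):
--     grid = []
--     for a in range(20):
--         linha = []
--         for b in range(10):
--             bloco = (0,0,0)
--             linha.append(bloco)
--         grid.append(linha)
--
--     for i in range(len(grid)):
--         for j in range(len(grid[i])):
--             if (j, i) in posicao_fixa:
--                 c = posicao_fixa[(j, i)]
--                 grid[i][j] = c
--
--     return grid
-- ===== SOURCE B (Python) =====
-- def cria_grid(posicao_fixa = {}):
--     grid = [[(0, 0, 0)] * 10 for _ in range(20)]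
--     for (j, i), c in posicao_fixa.items():
--         if 0 <= i < 20 and 0 <= j < 10:
--             grid[i][j] = c
--     return grid
-- ===== Notes on version B (the rewrite author's own statement) =====
-- stated objective: alternative
-- what changed: B builds the 20x10 all-black grid once and then iterates sparsely over posicao_fixa.items(), placing each colour at its (row, column) under a bounds guard, instead of A's full 20x10 scan testing dict membership at every cell.
import Mathlib
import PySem

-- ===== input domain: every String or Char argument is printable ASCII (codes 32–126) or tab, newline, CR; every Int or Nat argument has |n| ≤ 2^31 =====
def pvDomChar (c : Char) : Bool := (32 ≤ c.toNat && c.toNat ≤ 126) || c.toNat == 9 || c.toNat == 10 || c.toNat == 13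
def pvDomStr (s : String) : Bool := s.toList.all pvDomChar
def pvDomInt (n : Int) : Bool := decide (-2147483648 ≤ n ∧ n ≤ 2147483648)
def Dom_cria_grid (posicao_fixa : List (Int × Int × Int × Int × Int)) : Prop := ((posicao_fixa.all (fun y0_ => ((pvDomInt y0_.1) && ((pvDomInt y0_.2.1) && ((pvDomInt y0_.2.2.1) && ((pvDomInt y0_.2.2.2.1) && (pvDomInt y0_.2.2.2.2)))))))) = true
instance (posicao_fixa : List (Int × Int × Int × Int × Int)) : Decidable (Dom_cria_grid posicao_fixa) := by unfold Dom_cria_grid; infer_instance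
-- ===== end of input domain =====

-- B builds the all-black 20x10 grid once, then iterates SPARSELY over the dict's items and
-- places each colour at its cell under a bounds guard, instead of A's full scan of all 200
-- cells testing membership at each; an alternative traversal of the same data.
-- The dict parameter arrives as a flat association list: key (j, i) = first two components, value the colour triple.

-- ===== PORT A =====
def cria_grid (posicao_fixa : List (Int × Int × Int × Int × Int)) : List (List (Int × Int × Int)) :=
  let d := PySem.Dict.ofList (posicao_fixa.map (fun t => ((t.1, t.2.1), t.2.2)))
  let grid : List (List (Int × Int × Int)) :=
    (PySem.List.pyRange 0 20 1).foldl (fun g _ =>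
      g ++ [(PySem.List.pyRange 0 10 1).foldl
              (fun l _ => l ++ [((0 : Int), (0 : Int), (0 : Int))]) []]) []
  (PySem.List.pyRange 0 (grid.length : Int) 1).foldl (fun g i =>
    (PySem.List.pyRange 0 ((PySem.List.pyGetD g i ([] : List (Int × Int × Int))).length : Int) 1).foldl
      (fun g' j =>
        if d.contains (j, i) then
          PySem.List.pySetD g' i
            (PySem.List.pySetD (PySem.List.pyGetD g' i ([] : List (Int × Int × Int))) j
              (d.getD (j, i) ((0 : Int), (0 : Int), (0 : Int))))
        else g') g) grid

-- ===== PORT B =====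
def cria_grid_alt (posicao_fixa : List (Int × Int × Int × Int × Int)) : List (List (Int × Int × Int)) :=
  let d := PySem.Dict.ofList (posicao_fixa.map (fun t => ((t.1, t.2.1), t.2.2)))
  let grid : List (List (Int × Int × Int)) :=
    (PySem.List.pyRange 0 20 1).map (fun _ => List.replicate 10 ((0 : Int), (0 : Int), (0 : Int)))
  d.items.foldl (fun g kv =>
    if 0 ≤ kv.1.2 ∧ kv.1.2 < 20 ∧ 0 ≤ kv.1.1 ∧ kv.1.1 < 10 then
      PySem.List.pySetD g kv.1.2
        (PySem.List.pySetD (PySem.List.pyGetD g kv.1.2 ([] : List (Int × Int × Int))) kv.1.1 kv.2)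
    else g) grid

-- ===== PRECONDITION & SPEC =====
def Spec_cria_grid (posicao_fixa : List (Int × Int × Int × Int × Int)) (out : List (List (Int × Int × Int))) : Prop := out = cria_grid_alt posicao_fixa
instance (posicao_fixa : List (Int × Int × Int × Int × Int)) (out : List (List (Int × Int × Int))) : Decidable (Spec_cria_grid posicao_fixa out) := by unfold Spec_cria_grid; infer_instance

-- ===== CLAIM (what is proved, stated in full; the proofs are below) =====
def Claim_equal_cria_grid : Prop := ∀ (posicao_fixa : List (Int × Int × Int × Int × Int)), Dom_cria_grid posicao_fixa → Spec_cria_grid posicao_fixa (cria_grid posicao_fixa)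

-- ===== LEMMAS AND PROOFS =====

-- the common target: the grid whose cell (i, j) is d.getD (j, i) black
def pvG (d : PySem.Dict (Int × Int) (Int × Int × Int)) : List (List (Int × Int × Int)) :=
  (PySem.List.pyRange 0 20 1).map (fun i =>
    (PySem.List.pyRange 0 10 1).map (fun j => d.getD (j, i) ((0 : Int), (0 : Int), (0 : Int))))

-- ---------- A-side lemmas ----------
def pvRowF (d : PySem.Dict (Int × Int) (Int × Int × Int)) (i : Int)
    (row : List (Int × Int × Int)) : List (Int × Int × Int) :=
  (PySem.List.pyRange 0 10 1).foldl
    (fun r j => if d.contains (j, i) then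
        PySem.List.pySetD r j (d.getD (j, i) ((0 : Int), (0 : Int), (0 : Int)))
      else r) row

lemma pv_rowfold_len {α : Type} (c : Int → Bool) (v : Int → α) (L : List Int) :
    ∀ (row : List α),
      (L.foldl (fun r j => if c j then PySem.List.pySetD r j (v j) else r) row).length
        = row.length := by
  induction L with
  | nil => intro row; rfl
  | cons j L ih =>
      intro row
      rw [List.foldl_cons, ih]
      by_cases h : c j = true <;> simp [h, PySem.List.length_pySetD]

lemma pv_rowfold_get {α : Type} (c : Int → Bool) (v : Int → α) (L : List Int)
    (hL : ∀ j ∈ L, 0 ≤ j) :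
    ∀ (row : List α) (k : Nat), k < row.length →
      (L.foldl (fun r j => if c j then PySem.List.pySetD r j (v j) else r) row)[k]?
        = if ((k : Int) ∈ L ∧ c (k : Int) = true) then some (v (k : Int)) else row[k]? := by
  induction L with
  | nil => intro row k hk; simp
  | cons j L ih =>
      intro row k hk
      have hj : 0 ≤ j := hL j (List.mem_cons_self)
      rw [List.foldl_cons]
      have hlen : (if c j then PySem.List.pySetD row j (v j) else row).length = row.length := by
        by_cases h : c j = true <;> simp [h, PySem.List.length_pySetD]
      rw [ih (fun x hx => hL x (List.mem_cons_of_mem _ hx)) _ k (hlen ▸ hk)]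
      have hrk : (if c j then PySem.List.pySetD row j (v j) else row)[k]?
          = if ((k : Int) = j ∧ c j = true) then some (v j) else row[k]? := by
        by_cases h : c j = true
        · rw [if_pos h, PySem.List.pySetD_of_nonneg row (v j) hj]
          by_cases he : (k : Int) = j
          · have hjk : j.toNat = k := by omega
            simp [hjk, hk, he, h]
          · have hjk : j.toNat ≠ k := by omega
            simp [hjk, he]
        · simp [h]
      rw [hrk]
      by_cases h3 : (k : Int) = j
      · subst h3
        by_cases h2 : c (k : Int) = true <;>
          simp [h2, List.mem_cons]
      · by_cases h1 : (k : Int) ∈ L <;> by_cases h2 : c (k : Int) = true <;>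
          simp [h1, h2, h3, List.mem_cons]

lemma pv_gridfold {α : Type} (c : Int → Bool) (v : Int → α) (i : Int) (hi : 0 ≤ i)
    (L : List Int) :
    ∀ (g : List (List α)) (hig : i.toNat < g.length),
      L.foldl (fun g' j =>
          if c j then
            PySem.List.pySetD g' i
              (PySem.List.pySetD (PySem.List.pyGetD g' i ([] : List α)) j (v j))
          else g') g
      = g.set i.toNat
          (L.foldl (fun r j => if c j then PySem.List.pySetD r j (v j) else r) (g[i.toNat])) := by
  induction L with
  | nil => intro g hig; rw [List.foldl_nil, List.foldl_nil, List.set_getElem_self hig]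
  | cons j L ih =>
      intro g hig
      rw [List.foldl_cons, List.foldl_cons]
      by_cases h : c j = true
      · simp only [h, if_true]
        have hilt : i < (g.length : Int) := by omega
        have hget : PySem.List.pyGetD g i ([] : List α) = g[i.toNat] :=
          PySem.List.pyGetD_eq_getElem g [] hi hilt
        rw [hget, PySem.List.pySetD_of_nonneg g _ hi]
        rw [ih (g.set i.toNat (PySem.List.pySetD (g[i.toNat]) j (v j))) (by simpa using hig)]
        rw [List.set_set]
        have hsel : (g.set i.toNat (PySem.List.pySetD (g[i.toNat]) j (v j)))[i.toNat]'(by simpa using hig)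
            = PySem.List.pySetD (g[i.toNat]) j (v j) := List.getElem_set_self (by simpa using hig)
        rw [hsel]
      · simp only [h]
        exact ih g hig

lemma pv_outer (d : PySem.Dict (Int × Int) (Int × Int × Int)) (L : List Int) :
    ∀ (g : List (List (Int × Int × Int))), L.Nodup →
      (∀ i ∈ L, 0 ≤ i ∧ i.toNat < g.length) →
      (∀ (k : Nat) (hk : k < g.length), (g[k]).length = 10) →
      ∀ (k : Nat) (hk : k < g.length),
      (L.foldl (fun g i =>
        (PySem.List.pyRange 0 ((PySem.List.pyGetD g i ([] : List (Int × Int × Int))).length : Int) 1).foldl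
          (fun g' j =>
            if d.contains (j, i) then
              PySem.List.pySetD g' i
                (PySem.List.pySetD (PySem.List.pyGetD g' i ([] : List (Int × Int × Int))) j
                  (d.getD (j, i) ((0 : Int), (0 : Int), (0 : Int))))
            else g') g) g)[k]?
      = some (if (k : Int) ∈ L then pvRowF d (k : Int) (g[k]) else g[k]) := by
  induction L with
  | nil => intro g _ _ _ k hk; simp
  | cons i L ih =>
      intro g hnd hb hrows k hk
      have hi0 : 0 ≤ i := (hb i List.mem_cons_self).1
      have hin : i.toNat < g.length := (hb i List.mem_cons_self).2
      rw [List.foldl_cons]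
      have hilt : i < (g.length : Int) := by omega
      have hget : PySem.List.pyGetD g i ([] : List (Int × Int × Int)) = g[i.toNat] :=
        PySem.List.pyGetD_eq_getElem g [] hi0 hilt
      have hbound : ((PySem.List.pyGetD g i ([] : List (Int × Int × Int))).length : Int) = 10 := by
        rw [hget, hrows i.toNat hin]; norm_num
      rw [hbound]
      rw [pv_gridfold (fun j => d.contains (j, i))
            (fun j => d.getD (j, i) ((0 : Int), (0 : Int), (0 : Int))) i hi0 _ g hin]
      have hstep : g.set i.toNat
          ((PySem.List.pyRange 0 10 1).foldl
            (fun r j => if d.contains (j, i) then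
                PySem.List.pySetD r j (d.getD (j, i) ((0 : Int), (0 : Int), (0 : Int)))
              else r) (g[i.toNat]))
          = g.set i.toNat (pvRowF d i (g[i.toNat])) := rfl
      rw [hstep]
      have hrows1 : ∀ (m : Nat) (hm : m < (g.set i.toNat (pvRowF d i (g[i.toNat]))).length),
          ((g.set i.toNat (pvRowF d i (g[i.toNat])))[m]).length = 10 := by
        intro m hm
        have hm' : m < g.length := by simpa using hm
        by_cases hmi : i.toNat = m
        · subst hmi
          rw [List.getElem_set_self (by simpa using hin)]
          unfold pvRowF
          rw [pv_rowfold_len]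
          exact hrows i.toNat hin
        · rw [List.getElem_set_ne hmi]
          exact hrows m hm'
      rw [ih (g.set i.toNat (pvRowF d i (g[i.toNat]))) hnd.of_cons
            (fun x hx => ⟨(hb x (List.mem_cons_of_mem _ hx)).1,
              by simpa using (hb x (List.mem_cons_of_mem _ hx)).2⟩)
            hrows1 k (by simpa using hk)]
      have hiL : i ∉ L := (List.nodup_cons.mp hnd).1
      by_cases hke : (k : Int) = i
      · have hkn : i.toNat = k := by omega
        subst hkn
        have hcast : ((i.toNat : Nat) : Int) = i := by omega
        rw [hcast, if_neg hiL, List.getElem_set_self (by simpa using hin),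
            if_pos (List.mem_cons_self)]
      · have hkn : i.toNat ≠ k := by omega
        rw [List.getElem_set_ne hkn]
        by_cases hkL : (k : Int) ∈ L <;>
          simp [hkL, hke, List.mem_cons]

lemma pv_gridfold_len {α : Type} (c : Int → Bool) (v : Int → α) (i : Int) (L : List Int)
    (g : List (List α)) :
    (L.foldl (fun g' j =>
        if c j then
          PySem.List.pySetD g' i
            (PySem.List.pySetD (PySem.List.pyGetD g' i ([] : List α)) j (v j))
        else g') g).length = g.length := by
  induction L generalizing g with
  | nil => rfl
  | cons j L ih =>
      rw [List.foldl_cons, ih]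
      by_cases h : c j = true <;> simp [h, PySem.List.length_pySetD]

lemma pv_outer_len (d : PySem.Dict (Int × Int) (Int × Int × Int)) (L : List Int)
    (g : List (List (Int × Int × Int))) :
    (L.foldl (fun g i =>
      (PySem.List.pyRange 0 ((PySem.List.pyGetD g i ([] : List (Int × Int × Int))).length : Int) 1).foldl
        (fun g' j =>
          if d.contains (j, i) then
            PySem.List.pySetD g' i
              (PySem.List.pySetD (PySem.List.pyGetD g' i ([] : List (Int × Int × Int))) j
                (d.getD (j, i) ((0 : Int), (0 : Int), (0 : Int))))
          else g') g) g).length = g.length := by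
  induction L generalizing g with
  | nil => rfl
  | cons i L ih =>
      rw [List.foldl_cons, ih]
      exact pv_gridfold_len _ _ i _ g

lemma pv_row_eq (d : PySem.Dict (Int × Int) (Int × Int × Int)) (i : Int) :
    pvRowF d i (List.replicate 10 ((0 : Int), (0 : Int), (0 : Int)))
      = (PySem.List.pyRange 0 10 1).map
          (fun j => d.getD (j, i) ((0 : Int), (0 : Int), (0 : Int))) := by
  apply List.ext_getElem?
  intro m
  by_cases hm : m < 10
  · unfold pvRowF
    rw [pv_rowfold_get (fun j => d.contains (j, i))
          (fun j => d.getD (j, i) ((0 : Int), (0 : Int), (0 : Int)))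
          (PySem.List.pyRange 0 10 1)
          (fun j hj => (PySem.List.mem_pyRange_one.mp hj).1)
          _ m (by simpa using hm)]
    have hmem : (m : Int) ∈ PySem.List.pyRange 0 10 1 := by
      rw [PySem.List.mem_pyRange_one]; omega
    have hrhs : ((PySem.List.pyRange 0 10 1).map
        (fun j => d.getD (j, i) ((0 : Int), (0 : Int), (0 : Int))))[m]?
        = some (d.getD ((m : Int), i) ((0 : Int), (0 : Int), (0 : Int))) := by
      rw [List.getElem?_map, PySem.List.getElem?_pyRange_one]
      simp [hm]
    rw [hrhs]
    by_cases hc : d.contains ((m : Int), i) = true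
    · simp [hmem, hc]
    · have hz : d.getD ((m : Int), i) ((0 : Int), (0 : Int), (0 : Int))
          = ((0 : Int), (0 : Int), (0 : Int)) :=
        PySem.Dict.getD_of_not_contains d _ (by simpa using hc)
      rw [if_neg (by simp [hc]), hz, List.getElem?_replicate, if_pos hm]
  · have h1 : (pvRowF d i (List.replicate 10 ((0 : Int), (0 : Int), (0 : Int)))).length = 10 := by
      unfold pvRowF; rw [pv_rowfold_len]; simp
    have h2 : ((PySem.List.pyRange 0 10 1).map
        (fun j => d.getD (j, i) ((0 : Int), (0 : Int), (0 : Int)))).length = 10 := by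
      simp [PySem.List.length_pyRange_one]
    rw [List.getElem?_eq_none (by omega), List.getElem?_eq_none (by omega)]

-- A equals the common target grid
lemma pvA_eq (posicao_fixa : List (Int × Int × Int × Int × Int)) :
    cria_grid posicao_fixa
      = pvG (PySem.Dict.ofList (posicao_fixa.map (fun t => ((t.1, t.2.1), t.2.2)))) := by
  unfold cria_grid pvG
  dsimp only
  set d := PySem.Dict.ofList (posicao_fixa.map (fun t => ((t.1, t.2.1), t.2.2))) with hd
  have hbase : ((PySem.List.pyRange 0 20 1).foldl (fun g _ =>
      g ++ [(PySem.List.pyRange 0 10 1).foldl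
              (fun l _ => l ++ [((0 : Int), (0 : Int), (0 : Int))]) []])
      ([] : List (List (Int × Int × Int))))
      = List.replicate 20 (List.replicate 10 ((0 : Int), (0 : Int), (0 : Int))) := by decide
  rw [hbase]
  have hlen20 : ((List.replicate 20 (List.replicate 10 ((0 : Int), (0 : Int), (0 : Int)))).length : Int) = 20 := by simp
  rw [hlen20]
  apply List.ext_getElem?
  intro n
  by_cases hn : n < 20
  · rw [pv_outer d (PySem.List.pyRange 0 20 1) _ (PySem.List.nodup_pyRange_one 0 20)
        (fun i hi => by
          have := PySem.List.mem_pyRange_one.mp hi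
          exact ⟨this.1, by simp; omega⟩)
        (fun k hk => by rw [List.getElem_replicate]; exact List.length_replicate)
        n (by simpa using hn)]
    have hmem : (n : Int) ∈ PySem.List.pyRange 0 20 1 := by
      rw [PySem.List.mem_pyRange_one]; omega
    have hrhs : (((PySem.List.pyRange 0 20 1)).map (fun i =>
        (PySem.List.pyRange 0 10 1).map
          (fun j => d.getD (j, i) ((0 : Int), (0 : Int), (0 : Int)))))[n]?
        = some ((PySem.List.pyRange 0 10 1).map
            (fun j => d.getD (j, (n : Int)) ((0 : Int), (0 : Int), (0 : Int)))) := by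
      rw [List.getElem?_map, PySem.List.getElem?_pyRange_one]
      simp [hn]
    rw [hrhs]
    simp only [hmem, if_true, List.getElem_replicate]
    rw [pv_row_eq d (n : Int)]
  · rw [List.getElem?_eq_none (by rw [pv_outer_len]; simp; omega),
        List.getElem?_eq_none (by simp [PySem.List.length_pyRange_one]; omega)]

-- ---------- B-side lemmas ----------
-- B's placement step over one dict item
def pvStep (g : List (List (Int × Int × Int))) (kv : (Int × Int) × (Int × Int × Int)) :
    List (List (Int × Int × Int)) :=
  if 0 ≤ kv.1.2 ∧ kv.1.2 < 20 ∧ 0 ≤ kv.1.1 ∧ kv.1.1 < 10 then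
    PySem.List.pySetD g kv.1.2
      (PySem.List.pySetD (PySem.List.pyGetD g kv.1.2 ([] : List (Int × Int × Int))) kv.1.1 kv.2)
  else g

lemma pvB_len (L : List ((Int × Int) × (Int × Int × Int))) :
    ∀ g, (L.foldl pvStep g).length = g.length := by
  induction L with
  | nil => intro g; rfl
  | cons kv L ih =>
      intro g
      rw [List.foldl_cons, ih]
      unfold pvStep
      split_ifs <;> simp [PySem.List.length_pySetD]

lemma pvB_rows (L : List ((Int × Int) × (Int × Int × Int))) :
    ∀ g, g.length = 20 → (∀ r ∈ g, r.length = 10) → ∀ r ∈ L.foldl pvStep g, r.length = 10 := by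
  induction L with
  | nil => intro g _ hg; exact hg
  | cons kv L ih =>
      intro g hlen hg
      rw [List.foldl_cons]
      have hslen : (pvStep g kv).length = 20 := by
        unfold pvStep; split_ifs with h
        · rcases h with ⟨hi0, _, _, _⟩
          rw [PySem.List.pySetD_of_nonneg g _ hi0]; simp [hlen]
        · exact hlen
      apply ih _ hslen
      intro r hr
      unfold pvStep at hr
      split_ifs at hr with h
      · obtain ⟨hi0, hi20, hj0, hj10⟩ := h
        rw [PySem.List.pySetD_of_nonneg g _ hi0] at hr
        rcases List.mem_or_eq_of_mem_set hr with h1 | h1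
        · exact hg r h1
        · subst h1
          rw [PySem.List.length_pySetD]
          have hrange : kv.1.2.toNat < g.length := by omega
          have hget : PySem.List.pyGetD g kv.1.2 ([] : List (Int × Int × Int)) = g[kv.1.2.toNat] :=
            PySem.List.pyGetD_eq_getElem g [] hi0 (by omega)
          rw [hget]
          exact hg _ (List.getElem_mem hrange)
      · exact hg r hr

-- cell access through options
def pvAcc (g : List (List (Int × Int × Int))) (n m : Nat) : Option (Int × Int × Int) :=
  (g[n]?.getD [])[m]?

lemma pvB_fold (L : List ((Int × Int) × (Int × Int × Int)))
    (hnd : (L.map Prod.fst).Nodup) :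
    ∀ g, g.length = 20 → (∀ r ∈ g, r.length = 10) →
      ∀ (n m : Nat), n < 20 → m < 10 →
      pvAcc (L.foldl pvStep g) n m
        = match L.find? (fun kv => kv.1 == ((m : Int), (n : Int))) with
          | some kv => some kv.2
          | none => pvAcc g n m := by
  induction L with
  | nil => intro g _ _ n m _ _; simp
  | cons kv L ih =>
      intro g hlen hg n m hn hm
      rw [List.foldl_cons]
      have hslen : (pvStep g kv).length = 20 := by
        unfold pvStep; split_ifs with h
        · rcases h with ⟨hi0, _, _, _⟩
          rw [PySem.List.pySetD_of_nonneg g _ hi0]; simp [hlen]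
        · exact hlen
      have hsrows : ∀ r ∈ pvStep g kv, r.length = 10 := by
        have := pvB_rows [kv] g hlen hg
        simpa using this
      have hnd' : (L.map Prod.fst).Nodup := (List.nodup_cons.mp hnd).2
      rw [ih hnd' _ hslen hsrows n m hn hm]
      by_cases hk : kv.1 = ((m : Int), (n : Int))
      · -- head matches: below-fold finds nothing (nodup keys), cell = kv.2
        have hbeq : (fun p => p.1 == ((m : Int), (n : Int))) kv = true := by simp [hk]
        have hnotin : kv.1 ∉ L.map Prod.fst := (List.nodup_cons.mp hnd).1
        have hfind : L.find? (fun p => p.1 == ((m : Int), (n : Int))) = none := by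
          rw [List.find?_eq_none]
          intro p hp
          simp only [beq_iff_eq]
          intro hcontra
          exact hnotin (hk ▸ hcontra ▸ List.mem_map_of_mem hp)
        have hguard : 0 ≤ kv.1.2 ∧ kv.1.2 < 20 ∧ 0 ≤ kv.1.1 ∧ kv.1.1 < 10 := by
          rw [hk]; refine ⟨?_, ?_, ?_, ?_⟩ <;> simp <;> omega
        have hget : PySem.List.pyGetD g kv.1.2 ([] : List (Int × Int × Int)) = g[kv.1.2.toNat]'(by omega) :=
          PySem.List.pyGetD_eq_getElem g [] hguard.1 (by omega)
        have hiN : kv.1.2.toNat = n := by rw [hk]; simp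
        have hjN : kv.1.1.toNat = m := by rw [hk]; simp
        have hrow10 : (g[n]'(by omega)).length = 10 := hg _ (List.getElem_mem (by omega))
        have hacc : pvAcc (pvStep g kv) n m = some kv.2 := by
          unfold pvStep pvAcc
          rw [if_pos hguard, PySem.List.pySetD_of_nonneg g _ hguard.1, hget,
              PySem.List.pySetD_of_nonneg _ _ hguard.2.2.1]
          simp only [hiN, hjN]
          rw [List.getElem?_set_self (by omega)]
          simp only [Option.getD_some]
          rw [List.getElem?_set_self (by omega)]
        rw [hfind]
        simp only [List.find?_cons]
        have : (kv.1 == ((m : Int), (n : Int))) = true := by simpa using hk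
        rw [this]
        simpa using hacc
      · -- head misses (n, m): the cell is untouched by this placement
        have hbeq : ¬ ((fun p => p.1 == ((m : Int), (n : Int))) kv = true) := by simp [hk]
        have hstep : pvAcc (pvStep g kv) n m = pvAcc g n m := by
          unfold pvStep
          split_ifs with h
          · obtain ⟨hi0, hi20, hj0, hj10⟩ := h
            have hget : PySem.List.pyGetD g kv.1.2 ([] : List (Int × Int × Int)) = g[kv.1.2.toNat]'(by omega) :=
              PySem.List.pyGetD_eq_getElem g [] hi0 (by omega)
            rw [PySem.List.pySetD_of_nonneg g _ hi0, hget, PySem.List.pySetD_of_nonneg _ _ hj0]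
            unfold pvAcc
            by_cases hin : kv.1.2.toNat = n
            · have hjm : kv.1.1.toNat ≠ m := by
                intro hc
                apply hk
                have h1 : kv.1.1 = (m : Int) := by omega
                have h2 : kv.1.2 = (n : Int) := by omega
                exact Prod.ext h1 h2
              simp only [hin]
              rw [List.getElem?_set_self (by omega)]
              simp only [Option.getD_some]
              rw [List.getElem?_set_ne hjm]
              have hgn : g[n]? = some (g[n]'(by omega)) := List.getElem?_eq_getElem (by omega)
              rw [hgn]
              rfl
            · rw [List.getElem?_set_ne hin]
          · rfl
        rw [hstep]
        simp only [List.find?_cons]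
        have : (kv.1 == ((m : Int), (n : Int))) = false := by simpa using hk
        rw [this]

-- B equals the common target grid
lemma pvB_eq (posicao_fixa : List (Int × Int × Int × Int × Int)) :
    cria_grid_alt posicao_fixa
      = pvG (PySem.Dict.ofList (posicao_fixa.map (fun t => ((t.1, t.2.1), t.2.2)))) := by
  unfold cria_grid_alt pvG
  dsimp only
  set d := PySem.Dict.ofList (posicao_fixa.map (fun t => ((t.1, t.2.1), t.2.2))) with hd
  set base : List (List (Int × Int × Int)) :=
    (PySem.List.pyRange 0 20 1).map (fun _ => List.replicate 10 ((0 : Int), (0 : Int), (0 : Int))) with hbase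
  have hbl : base.length = 20 := by
    rw [hbase]; simp [PySem.List.length_pyRange_one]
  have hbr : ∀ r ∈ base, r.length = 10 := by
    intro r hr
    rw [hbase] at hr
    rcases List.mem_map.mp hr with ⟨_, _, hr'⟩
    rw [← hr']; simp
  have hnd : (d.items.map Prod.fst).Nodup := PySem.Dict.nodup_keys_ofList _
  have hfold : d.items.foldl (fun g kv =>
      if 0 ≤ kv.1.2 ∧ kv.1.2 < 20 ∧ 0 ≤ kv.1.1 ∧ kv.1.1 < 10 then
        PySem.List.pySetD g kv.1.2
          (PySem.List.pySetD (PySem.List.pyGetD g kv.1.2 ([] : List (Int × Int × Int))) kv.1.1 kv.2)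
      else g) base = d.items.foldl pvStep base := rfl
  rw [hfold]
  have hlen1 : (d.items.foldl pvStep base).length = 20 := by rw [pvB_len, hbl]
  have hlen2 : ((PySem.List.pyRange 0 20 1).map (fun i => (PySem.List.pyRange 0 10 1).map
      (fun j => d.getD (j, i) ((0 : Int), (0 : Int), (0 : Int))))).length = 20 := by
    simp [PySem.List.length_pyRange_one]
  apply List.ext_getElem (hlen1.trans hlen2.symm)
  intro n h1 h2
  have hn : n < 20 := by omega
  have hrhs? : ((PySem.List.pyRange 0 20 1).map (fun i => (PySem.List.pyRange 0 10 1).map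
      (fun j => d.getD (j, i) ((0 : Int), (0 : Int), (0 : Int)))))[n]?
      = some ((PySem.List.pyRange 0 10 1).map
          (fun j => d.getD (j, (n : Int)) ((0 : Int), (0 : Int), (0 : Int)))) := by
    rw [List.getElem?_map, PySem.List.getElem?_pyRange_one]
    simp [hn]
  have hrhs : ((PySem.List.pyRange 0 20 1).map (fun i => (PySem.List.pyRange 0 10 1).map
      (fun j => d.getD (j, i) ((0 : Int), (0 : Int), (0 : Int)))))[n]'h2
      = (PySem.List.pyRange 0 10 1).map
          (fun j => d.getD (j, (n : Int)) ((0 : Int), (0 : Int), (0 : Int))) :=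
    Option.some.inj ((List.getElem?_eq_getElem h2).symm.trans hrhs?)
  rw [hrhs]
  apply List.ext_getElem?
  intro m
  by_cases hm : m < 10
  · have hL : ((d.items.foldl pvStep base)[n]'h1)[m]? = pvAcc (d.items.foldl pvStep base) n m := by
      unfold pvAcc
      rw [List.getElem?_eq_getElem h1]
      rfl
    rw [hL, pvB_fold d.items hnd base hbl hbr n m hn hm]
    have hR : ((PySem.List.pyRange 0 10 1).map
        (fun j => d.getD (j, (n : Int)) ((0 : Int), (0 : Int), (0 : Int))))[m]?
        = some (d.getD ((m : Int), (n : Int)) ((0 : Int), (0 : Int), (0 : Int))) := by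
      rw [List.getElem?_map, PySem.List.getElem?_pyRange_one]
      simp [hm]
    rw [hR]
    cases hf : d.items.find? (fun p => p.1 == ((m : Int), (n : Int))) with
    | some kv =>
        have hmem : kv ∈ d.items := List.mem_of_find?_eq_some hf
        have hkeq : kv.1 = ((m : Int), (n : Int)) := by
          have := List.find?_some hf
          simpa using this
        have hmem' : (((m : Int), (n : Int)), kv.2) ∈ d.items := by
          rw [← hkeq]; exact hmem
        have hgd : d.getD ((m : Int), (n : Int)) ((0 : Int), (0 : Int), (0 : Int)) = kv.2 :=
          PySem.Dict.getD_of_mem_items d hmem' hnd _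
        simp [hgd]
    | none =>
        have hnin : ((m : Int), (n : Int)) ∉ d.keys := by
          intro hc
          rcases List.mem_map.mp hc with ⟨p, hp, hpe⟩
          have := List.find?_eq_none.mp hf p hp
          simp [hpe] at this
        have hcon : d.contains ((m : Int), (n : Int)) = false := by
          rw [PySem.Dict.contains_eq_decide_mem_keys]
          simpa using hnin
        have hgd : d.getD ((m : Int), (n : Int)) ((0 : Int), (0 : Int), (0 : Int))
            = ((0 : Int), (0 : Int), (0 : Int)) := PySem.Dict.getD_of_not_contains d _ hcon
        have hbn : base[n]? = some (List.replicate 10 ((0 : Int), (0 : Int), (0 : Int))) := by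
          rw [hbase, List.getElem?_map, PySem.List.getElem?_pyRange_one]
          simp [hn]
        have hbacc : pvAcc base n m = some ((0 : Int), (0 : Int), (0 : Int)) := by
          unfold pvAcc
          rw [hbn]
          simp only [Option.getD_some]
          rw [List.getElem?_replicate, if_pos hm]
        simp [hbacc, hgd]
  · have hr10 : ((d.items.foldl pvStep base)[n]'h1).length = 10 :=
      pvB_rows d.items base hbl hbr _ (List.getElem_mem h1)
    rw [List.getElem?_eq_none (by omega),
        List.getElem?_eq_none (by simp [PySem.List.length_pyRange_one]; omega)]

-- ===== VERDICT (by name: the statement is the Claim_ definition above) =====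
theorem cria_grid_spec : Claim_equal_cria_grid := by
  intro pf _
  unfold Spec_cria_grid
  rw [pvA_eq pf, pvB_eq pf]
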